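-- pv_equiv track=rewrite | github.com/dgarwin/westiesocials | main.py | filter_blocked_domains
-- ===== SOURCE A (Python) =====
-- def filter_blocked_domains(urls, blocked_domains):
--     filtered_urls = []
--     for url in urls:
--         if url is None:
--             continue
--         blocked = False
--         for domain in blocked_domains:
--             if domain in url:
--                 blocked = True
--                 break
--         if not blocked:
--             filtered_urls.append(url)
--     return filtered_urls
-- ===== SOURCE B (Python) =====
-- def filter_blocked_domains(urls, blocked_domains):
--     # Domain-outer strategy: start from the non-None urls and, for each blocked
--     # domain, filter out in one pass every url still containing it.
--     remaining = [url for url in urls if url is not None]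
--     for domain in blocked_domains:
--         remaining = [url for url in remaining if domain not in url]
--     return remaining
-- ===== Notes on version B (the rewrite author's own statement) =====
-- stated objective: alternative
-- what changed: A loops over urls with an inner per-url scan of all domains and a blocked flag with break; B inverts the nesting: it keeps the non-None urls and applies one filtering pass per blocked domain, so the candidate list shrinks as domains are processed and there is no flag or break.
import Mathlib
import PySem

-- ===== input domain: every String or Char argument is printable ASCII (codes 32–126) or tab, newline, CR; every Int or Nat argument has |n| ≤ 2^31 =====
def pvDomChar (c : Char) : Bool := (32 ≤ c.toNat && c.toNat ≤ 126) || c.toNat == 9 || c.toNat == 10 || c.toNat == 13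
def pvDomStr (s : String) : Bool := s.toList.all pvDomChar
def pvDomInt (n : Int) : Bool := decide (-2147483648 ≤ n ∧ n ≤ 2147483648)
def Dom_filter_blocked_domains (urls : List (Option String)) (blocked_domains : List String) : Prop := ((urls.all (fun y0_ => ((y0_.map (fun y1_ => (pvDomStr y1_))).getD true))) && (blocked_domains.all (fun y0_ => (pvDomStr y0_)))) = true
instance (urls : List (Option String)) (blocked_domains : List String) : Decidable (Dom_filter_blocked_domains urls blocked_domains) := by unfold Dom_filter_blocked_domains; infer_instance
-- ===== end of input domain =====

-- B replaces A's url-outer loop (flag + break over the domains per url) by a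
-- domain-outer sequence of filter passes over the remaining urls: alternative
-- decomposition of the same O(U*D) task, no claimed speed-up.

-- ===== PORT A =====
-- inner 'for domain in blocked_domains: if domain in url: blocked = True; break'
def pvBlockedLoop (url : String) : List String → Bool
  | [] => false
  | d :: ds => if PySem.Str.isIn d url then true else pvBlockedLoop url ds

-- outer 'for url in urls' loop carrying the filtered_urls accumulator
def pvUrlLoop (bd : List String) (filtered_urls : List String) : List (Option String) → List String
  | [] => filtered_urls
  | none :: rest => pvUrlLoop bd filtered_urls rest       -- 'if url is None: continue'
  | some url :: rest =>
    if pvBlockedLoop url bd then pvUrlLoop bd filtered_urls rest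
    else pvUrlLoop bd (filtered_urls ++ [url]) rest

def filter_blocked_domains (urls : List (Option String)) (blocked_domains : List String) : List String :=
  pvUrlLoop blocked_domains [] urls

-- ===== PORT B =====
def filter_blocked_domains_alt (urls : List (Option String)) (blocked_domains : List String) : List String :=
  blocked_domains.foldl
    (fun remaining domain => remaining.filter (fun url => !(PySem.Str.isIn domain url)))
    (urls.filterMap (fun url => url))

-- ===== PRECONDITION & SPEC =====
def Spec_filter_blocked_domains (urls : List (Option String)) (blocked_domains : List String) (out : List String) : Prop := out = filter_blocked_domains_alt urls blocked_domains
instance (urls : List (Option String)) (blocked_domains : List String) (out : List String) : Decidable (Spec_filter_blocked_domains urls blocked_domains out) := by unfold Spec_filter_blocked_domains; infer_instance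

-- ===== CLAIM (what is proved, stated in full; the proofs are below) =====
def Claim_equal_filter_blocked_domains : Prop := ∀ (urls : List (Option String)) (blocked_domains : List String), Dom_filter_blocked_domains urls blocked_domains → Spec_filter_blocked_domains urls blocked_domains (filter_blocked_domains urls blocked_domains)

-- ===== LEMMAS AND PROOFS =====

-- A's break-loop decides 'some blocked domain occurs in url'.
theorem pvBlockedLoop_eq_any (url : String) (ds : List String) :
    pvBlockedLoop url ds = ds.any (fun d => PySem.Str.isIn d url) := by
  induction ds with
  | nil => rfl
  | cons d ds ih => cases h : PySem.Str.isIn d url <;> simp [pvBlockedLoop, ih]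

-- A's url loop, generalized over the accumulator.
theorem pvA_loop (bd : List String) (urls : List (Option String)) (acc : List String) :
    pvUrlLoop bd acc urls
    = acc ++ (urls.filterMap (fun u => u)).filter
        (fun url => !(pvBlockedLoop url bd)) := by
  induction urls generalizing acc with
  | nil => simp [pvUrlLoop]
  | cons ou rest ih =>
    cases ou with
    | none => simpa [pvUrlLoop] using ih acc
    | some url =>
      cases h : pvBlockedLoop url bd <;>
        simp [pvUrlLoop, h, ih]

-- B's domain loop: successive filter passes = one filter with the 'any' predicate.
theorem pvB_foldl (bd : List String) (l : List String) :
    bd.foldl (fun remaining domain =>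
        remaining.filter (fun url => !(PySem.Str.isIn domain url))) l
    = l.filter (fun url => !(bd.any (fun d => PySem.Str.isIn d url))) := by
  induction bd generalizing l with
  | nil => simp
  | cons d ds ih =>
    simp only [List.foldl_cons, ih, List.filter_filter, List.any_cons]
    apply List.filter_congr
    intro x _
    cases PySem.Str.isIn d x <;> simp

-- ===== VERDICT (by name: the statement is the Claim_ definition above) =====
theorem filter_blocked_domains_spec : Claim_equal_filter_blocked_domains := by
  intro urls bd _
  unfold Spec_filter_blocked_domains filter_blocked_domains filter_blocked_domains_alt
  rw [pvA_loop, pvB_foldl]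
  simp only [List.nil_append]
  exact List.filter_congr (fun x _ => by rw [pvBlockedLoop_eq_any])
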